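-- pv_equiv track=rewrite | github.com/enchantuer/HIDS | to_send/local/analyse_snort.py | convert_snort_hex
-- ===== SOURCE A (Python) =====
-- def convert_snort_hex(content):
--     parts = content.split('|')
--     converted = ""
--     for i, part in enumerate(parts):
--         if i % 2 == 0:
--             converted += part  # Texte normal
--         else:
--             hex_values = part.strip().split()
--             converted += "".join(chr(int(h, 16)) for h in hex_values)  # Convert to text
--     return converted
-- ===== SOURCE B (Python) =====
-- def _flush(buf, in_hex):
--     s = ''.join(buf)
--     if in_hex:
--         return ''.join(chr(int(h, 16)) for h in s.strip().split())
--     return s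
--
--
-- def convert_snort_hex(content):
--     out = []
--     buf = []
--     in_hex = False
--     for c in content:
--         if c == '|':
--             out.append(_flush(buf, in_hex))
--             buf = []
--             in_hex = not in_hex
--         else:
--             buf.append(c)
--     out.append(_flush(buf, in_hex))
--     return ''.join(out)
-- ===== Notes on version B (the rewrite author's own statement) =====
-- stated objective: alternative
-- what changed: Replaced split('|')-then-enumerate-with-parity by a single left-to-right character scan that keeps a buffer and a toggling in_hex flag, flushing the buffer (verbatim or hex-decoded) at each pipe and once at the end.
import Mathlib
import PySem

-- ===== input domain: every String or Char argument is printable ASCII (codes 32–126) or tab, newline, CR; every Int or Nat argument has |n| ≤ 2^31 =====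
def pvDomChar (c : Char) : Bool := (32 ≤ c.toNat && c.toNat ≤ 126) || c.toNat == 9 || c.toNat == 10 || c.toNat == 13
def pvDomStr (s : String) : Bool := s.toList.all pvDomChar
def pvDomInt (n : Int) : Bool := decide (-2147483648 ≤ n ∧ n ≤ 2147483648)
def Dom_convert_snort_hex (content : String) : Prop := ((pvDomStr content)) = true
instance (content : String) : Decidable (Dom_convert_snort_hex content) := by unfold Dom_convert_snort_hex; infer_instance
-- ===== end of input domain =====

-- B replaces split-then-alternate by a single character scan with a buffer and a toggling hex flag (alternative decomposition, same cost).


-- ===== PORT A =====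
-- chr(n): none where Python's chr raises (n < 0 or n > 0x10FFFF) and on lone surrogates
-- (which Python returns but which are not representable as a Lean Char; Pre_ excludes them).
def pvChr? (n : Int) : Option Char :=
  if _h : 0 ≤ n ∧ Nat.isValidChar n.toNat then some (Char.ofNat n.toNat) else none

-- chr(int(h, 16)); the ' ' default is never reached under Pre_ (every token decodes).
def pvHexCharD (h : List Char) : Char :=
  ((PySem.Int.ofCharsBase? h 16).bind pvChr?).getD ' '

-- the 'for i, part in enumerate(parts)' loop, with the running index and accumulator
def pvALoop : List (List Char) → Nat → List Char → List Char
  | [], _, conv => conv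
  | part :: rest, i, conv =>
      pvALoop rest (i + 1)
        (conv ++ (if i % 2 = 0 then part
                  else (PySem.Chars.split₀ (PySem.Chars.strip part)).map pvHexCharD))

def convert_snort_hex (content : String) : String :=
  String.ofList (pvALoop (PySem.Chars.splitOn content.toList ['|']) 0 [])

-- ===== PORT B =====
-- _flush(buf, in_hex)
def pvFlush (buf : List Char) (inHex : Bool) : List Char :=
  if inHex then (PySem.Chars.split₀ (PySem.Chars.strip buf)).map pvHexCharD else buf

-- the character scan: state = (remaining chars, buffer, in_hex flag, output)
def pvScan : List Char → List Char → Bool → List Char → List Char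
  | [], buf, inHex, out => out ++ pvFlush buf inHex
  | c :: rest, buf, inHex, out =>
      if c = '|' then pvScan rest [] (!inHex) (out ++ pvFlush buf inHex)
      else pvScan rest (buf ++ [c]) inHex out

def convert_snort_hex_alt (content : String) : String :=
  String.ofList (pvScan content.toList [] false [])

-- ===== PRECONDITION & SPEC =====
-- Pre_ excludes exactly the inputs where A raises (a whitespace-separated token of an
-- odd-indexed '|'-section that is not valid hex, or whose value is outside chr's range)
-- and the inputs where chr returns a lone surrogate U+D800–U+DFFF, a value not
-- representable as a Lean Char.
def Pre_convert_snort_hex (content : String) : Prop :=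
  ∀ x ∈ (PySem.Chars.splitOn content.toList ['|']).zipIdx, x.2 % 2 = 1 →
    ∀ h ∈ PySem.Chars.split₀ (PySem.Chars.strip x.1),
      ((PySem.Int.ofCharsBase? h 16).bind pvChr?).isSome = true
instance (content : String) : Decidable (Pre_convert_snort_hex content) := by
  unfold Pre_convert_snort_hex; infer_instance

def pvWitness_convert_snort_hex : String := "alert |41 42 0a| tcp"

def Spec_convert_snort_hex (content : String) (out : String) : Prop := out = convert_snort_hex_alt content
instance (content : String) (out : String) : Decidable (Spec_convert_snort_hex content out) := by unfold Spec_convert_snort_hex; infer_instance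

-- ===== CLAIM (what is proved, stated in full; the proofs are below) =====
def Claim_equal_convert_snort_hex : Prop := ∀ (content : String), Dom_convert_snort_hex content → Pre_convert_snort_hex content → Spec_convert_snort_hex content (convert_snort_hex content)

-- ===== LEMMAS AND PROOFS =====

-- reference single-character split on '|' (proof-only)
def pvSplit : List Char → List (List Char)
  | [] => [[]]
  | c :: rest =>
      if c = '|' then [] :: pvSplit rest
      else
        match pvSplit rest with
        | [] => [[c]]
        | p :: ps => (c :: p) :: ps

def pvMapFirst (f : List Char → List Char) : List (List Char) → List (List Char)
  | [] => []
  | p :: ps => f p :: ps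

-- process the section list, alternating text/hex (proof-only common form)
def pvProcs : Bool → List (List Char) → List Char
  | _, [] => []
  | b, p :: ps => pvFlush p b ++ pvProcs (!b) ps

theorem pvSplit_ne_nil (cs : List Char) : pvSplit cs ≠ [] := by
  cases cs with
  | nil => simp [pvSplit]
  | cons c rest =>
      simp only [pvSplit]
      split
      · simp
      · cases h : pvSplit rest <;> simp

theorem pvMapFirst_eq_self (f : List Char → List Char) (hf : ∀ p, f p = p)
    (s : List (List Char)) : pvMapFirst f s = s := by
  cases s <;> simp [pvMapFirst, hf]

theorem pvGo_eq (fuel : Nat) : ∀ (l cur : List Char) (out : List (List Char)),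
    l.length < fuel →
    PySem.Chars.splitOn.go ['|'] fuel l cur out =
      out.reverse ++ pvMapFirst (fun p => cur.reverse ++ p) (pvSplit l) := by
  induction fuel with
  | zero => intro l cur out h; omega
  | succ fuel ih =>
      intro l cur out h
      cases l with
      | nil =>
          simp [PySem.Chars.splitOn.go, pvSplit, pvMapFirst]
      | cons c rest =>
          simp only [PySem.Chars.splitOn.go]
          by_cases hc : c = '|'
          · subst hc
            rw [if_pos (by simp [List.isPrefixOf])]
            rw [ih (List.drop ['|'].length ('|' :: rest)) [] (cur.reverse :: out)
                (by simp at h ⊢; omega)]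
            rw [pvMapFirst_eq_self _ (fun p => by simp)]
            simp [pvSplit, pvMapFirst]
          · rw [if_neg (by simp [List.isPrefixOf]; exact fun e => hc e.symm)]
            rw [ih rest (c :: cur) out (by simp at h ⊢; omega)]
            have hne := pvSplit_ne_nil rest
            cases hs : pvSplit rest with
            | nil => exact absurd hs hne
            | cons p ps =>
                simp [pvSplit, hc, hs, pvMapFirst]

theorem pvSplitOn_eq (cs : List Char) :
    PySem.Chars.splitOn cs ['|'] = pvSplit cs := by
  show PySem.Chars.splitOn.go ['|'] (cs.length + 1) cs [] [] = pvSplit cs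
  rw [pvGo_eq (cs.length + 1) cs [] [] (by omega)]
  rw [pvMapFirst_eq_self _ (fun p => by simp)]
  simp

theorem pvALoop_eq (ps : List (List Char)) : ∀ (i : Nat) (conv : List Char),
    pvALoop ps i conv = conv ++ pvProcs (decide (i % 2 = 1)) ps := by
  induction ps with
  | nil => intro i conv; simp [pvALoop, pvProcs]
  | cons p rest ih =>
      intro i conv
      simp only [pvALoop, pvProcs]
      rw [ih]
      have hpar : (decide ((i + 1) % 2 = 1)) = !(decide (i % 2 = 1)) := by
        rcases Nat.mod_two_eq_zero_or_one i with h | h <;> simp [h, Nat.add_mod]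
      rcases Nat.mod_two_eq_zero_or_one i with h | h <;>
        simp [h, hpar, pvFlush, List.append_assoc]

theorem pvScan_acc (cs : List Char) : ∀ (buf : List Char) (b : Bool) (out : List Char),
    pvScan cs buf b out = out ++ pvScan cs buf b [] := by
  induction cs with
  | nil => intro buf b out; simp [pvScan]
  | cons c rest ih =>
      intro buf b out
      by_cases hc : c = '|'
      · subst hc
        simp only [pvScan]
        rw [ih [] (!b) (out ++ pvFlush buf b), ih [] (!b) ([] ++ pvFlush buf b)]
        simp
      · simp only [pvScan, if_neg hc]
        exact ih (buf ++ [c]) b out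

theorem pvScan_eq (cs : List Char) : ∀ (buf : List Char) (b : Bool),
    pvScan cs buf b [] = pvProcs b (pvMapFirst (fun p => buf ++ p) (pvSplit cs)) := by
  induction cs with
  | nil => intro buf b; simp [pvScan, pvSplit, pvMapFirst, pvProcs]
  | cons c rest ih =>
      intro buf b
      by_cases hc : c = '|'
      · subst hc
        simp only [pvScan]
        rw [pvScan_acc, ih [] (!b)]
        rw [pvMapFirst_eq_self _ (fun p => by simp)]
        simp [pvSplit, pvMapFirst, pvProcs]
      · simp only [pvScan, if_neg hc]
        rw [ih (buf ++ [c]) b]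
        have hne := pvSplit_ne_nil rest
        cases hs : pvSplit rest with
        | nil => exact absurd hs hne
        | cons p ps => simp [pvSplit, hc, hs, pvMapFirst]

-- ===== VERDICT (by name: the statement is the Claim_ definition above) =====
theorem convert_snort_hex_spec : Claim_equal_convert_snort_hex := by
  intro content _ _
  unfold Spec_convert_snort_hex convert_snort_hex convert_snort_hex_alt
  rw [pvSplitOn_eq, pvALoop_eq, pvScan_eq]
  rw [pvMapFirst_eq_self _ (fun p => by simp)]
  simp
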